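-- pv_equiv track=rewrite | github.com/Srinivas11789/AlgorithmNuggets | ProblemSolving/largestValuesFromLabels/large.py | largestValsFromLabels
-- ===== SOURCE A (Python) =====
-- def largestValsFromLabels(values, labels, num_wanted, use_limit):
--     """
--     :type values: List[int]
--     :type labels: List[int]
--     :type num_wanted: int
--     :type use_limit: int
--     :rtype: int
--     """
--
--     indexes = range(0,len(values))
--     maxi = -60000
--     import itertools
--     for S in range(num_wanted+1):
--         for subset in itertools.combinations(indexes, r=S):
--             subset_label = []
--             subset_values = []
--             for item in subset:
--                 subset_label.append(labels[item])
--                 subset_values.append(values[item])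
--             import collections
--             counts = collections.Counter(subset_label)
--             y = 0
--             for c in counts.values():
--                 if c <= use_limit:
--                     y += 1
--             #print subset, subset_label, subset_values
--             if y == len(counts.keys()):
--                 if sum(subset_values) > maxi:
--                     maxi = sum(subset_values)
--     return maxi
-- ===== SOURCE B (Python) =====
-- def largestValsFromLabels(values, labels, num_wanted, use_limit):
--     total = 0
--     used = {}
--     remaining = num_wanted
--     for v, l in sorted(zip(values, labels), key=lambda p: -p[0]):
--         if remaining <= 0 or v <= 0:
--             break
--         if used.get(l, 0) < use_limit:
--             used[l] = used.get(l, 0) + 1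
--             total += v
--             remaining -= 1
--     return total
-- ===== Notes on version B (the rewrite author's own statement) =====
-- stated objective: faster
-- what changed: Replaced A's exhaustive enumeration of all index subsets of size 0..num_wanted (itertools.combinations plus a Counter feasibility check per subset) by a single greedy pass over the pairs sorted by value descending, taking each positive value while its label's use count and the overall count cap allow (exact because the size cap plus per-label limits form a matroid). Intended as faster: asymptotically exponential vs O(n log n); a timing run measured B 356x faster at the largest size A finished, but could not fully confirm because A times out beyond that.
-- outside the precondition, e.g. on largestValsFromLabels([], [], -1, 1): A returns -60000, B returns 0
import Mathlib
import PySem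

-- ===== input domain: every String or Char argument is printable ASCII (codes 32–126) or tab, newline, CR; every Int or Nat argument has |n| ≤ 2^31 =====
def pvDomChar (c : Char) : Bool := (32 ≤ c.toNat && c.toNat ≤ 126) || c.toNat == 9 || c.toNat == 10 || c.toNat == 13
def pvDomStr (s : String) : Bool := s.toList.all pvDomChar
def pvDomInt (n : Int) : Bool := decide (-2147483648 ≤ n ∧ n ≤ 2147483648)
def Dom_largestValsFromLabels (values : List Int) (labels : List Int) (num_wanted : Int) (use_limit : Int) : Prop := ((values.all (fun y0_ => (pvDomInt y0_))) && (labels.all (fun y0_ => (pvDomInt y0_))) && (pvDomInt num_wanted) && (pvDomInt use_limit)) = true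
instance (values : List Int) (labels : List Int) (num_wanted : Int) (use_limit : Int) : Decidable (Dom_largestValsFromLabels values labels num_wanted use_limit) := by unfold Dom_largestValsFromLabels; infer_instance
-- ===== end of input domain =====

-- B replaces A's exhaustive subset enumeration by one greedy pass over the pairs
-- sorted by value descending (exact: the size cap + per-label limits form a matroid);
-- intended as faster (A does one pass per subset); a timing run could not confirm
-- this at the largest sizes because A itself times out there.

-- ===== PORT A =====
def largestValsFromLabels (values : List Int) (labels : List Int) (num_wanted : Int) (use_limit : Int) : Int :=
  let indexes := PySem.List.pyRange 0 (values.length : Int) 1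
  (PySem.List.pyRange 0 (num_wanted + 1) 1).foldl (fun maxi S =>
    (PySem.List.combinations indexes S.toNat).foldl (fun maxi subset =>
      -- the loop 'for item in subset' builds subset_label and subset_values together
      let lv := subset.foldl (fun (acc : List Int × List Int) item =>
        (acc.1 ++ [PySem.List.pyGetD labels item 0], acc.2 ++ [PySem.List.pyGetD values item 0])) ([], [])
      let counts := PySem.Dict.counter lv.1
      let y := counts.values.foldl (fun y c => if c ≤ use_limit then y + 1 else y) (0 : Int)
      if y = (counts.keys.length : Int) then
        (if lv.2.sum > maxi then lv.2.sum else maxi)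
      else maxi) maxi) (-60000)

-- ===== PORT B =====
-- the greedy loop of Source B, with its two 'break'/skip branches
def pvGreedyGo (use_limit : Int) : List (Int × Int) → PySem.Dict Int Int → Int → Int → Int
  | [], _, _, total => total
  | (v, l) :: rest, used, remaining, total =>
    if remaining ≤ 0 ∨ v ≤ 0 then total
    else if used.getD l 0 < use_limit then
      pvGreedyGo use_limit rest (used.insert l (used.getD l 0 + 1)) (remaining - 1) (total + v)
    else
      pvGreedyGo use_limit rest used remaining total

def largestValsFromLabels_alt (values : List Int) (labels : List Int) (num_wanted : Int) (use_limit : Int) : Int :=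
  pvGreedyGo use_limit (PySem.List.sorted (values.zip labels) (fun p => -p.1) false)
    PySem.Dict.empty num_wanted 0

-- ===== PRECONDITION & SPEC =====
-- Pre_ restricts num_wanted to the natural domain of a count, num_wanted ≥ 0: for negative
-- num_wanted A's loop never runs and it returns its arbitrary sentinel -60000 (B returns 0);
-- and it excludes len(values) > len(labels) with num_wanted ≥ 1, where A raises IndexError.
def Pre_largestValsFromLabels (values : List Int) (labels : List Int) (num_wanted : Int) (use_limit : Int) : Prop :=
  0 ≤ num_wanted ∧ (num_wanted = 0 ∨ values.length ≤ labels.length)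
instance (values : List Int) (labels : List Int) (num_wanted : Int) (use_limit : Int) : Decidable (Pre_largestValsFromLabels values labels num_wanted use_limit) := by unfold Pre_largestValsFromLabels; infer_instance

def pvWitness_largestValsFromLabels : List Int × List Int × Int × Int := ([3, 1, 2], [1, 1, 2], 2, 1)

def Spec_largestValsFromLabels (values : List Int) (labels : List Int) (num_wanted : Int) (use_limit : Int) (out : Int) : Prop := out = largestValsFromLabels_alt values labels num_wanted use_limit
instance (values : List Int) (labels : List Int) (num_wanted : Int) (use_limit : Int) (out : Int) : Decidable (Spec_largestValsFromLabels values labels num_wanted use_limit out) := by unfold Spec_largestValsFromLabels; infer_instance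

-- ===== CLAIM (what is proved, stated in full; the proofs are below) =====
def Claim_equal_largestValsFromLabels : Prop := ∀ (values : List Int) (labels : List Int) (num_wanted : Int) (use_limit : Int), Dom_largestValsFromLabels values labels num_wanted use_limit → Pre_largestValsFromLabels values labels num_wanted use_limit → Spec_largestValsFromLabels values labels num_wanted use_limit (largestValsFromLabels values labels num_wanted use_limit)

-- ===== LEMMAS AND PROOFS =====

def pvDec (f : Int → Int) (l : Int) : Int → Int := fun m => if m = l then f m - 1 else f m

def pvOpt : List (Int × Int) → Nat → (Int → Int) → Int
  | [], _, _ => 0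
  | _ :: _, 0, _ => 0
  | (v, l) :: s, k + 1, f =>
    max (pvOpt s (k + 1) f) (if 1 ≤ f l then v + pvOpt s k (pvDec f l) else pvOpt s (k + 1) f)

def pvSum (t : List (Int × Int)) : Int := (t.map Prod.fst).sum

def pvFeas (k : Nat) (f : Int → Int) (t : List (Int × Int)) : Prop :=
  t.length ≤ k ∧ ∀ l, (t.map Prod.snd).count l = 0 ∨ ((t.map Prod.snd).count l : Int) ≤ f l

theorem pvOpt_zero (s : List (Int × Int)) (f : Int → Int) : pvOpt s 0 f = 0 := by
  cases s with
  | nil => rfl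
  | cons a t => rcases a with ⟨v, l⟩; rfl

theorem pvOpt_nil (k : Nat) (f : Int → Int) : pvOpt [] k f = 0 := rfl

theorem pvOpt_nonneg (s : List (Int × Int)) (k : Nat) (f : Int → Int) : 0 ≤ pvOpt s k f := by
  induction s generalizing k f with
  | nil => simp [pvOpt_nil]
  | cons a s ih =>
    rcases a with ⟨v, l⟩
    cases k with
    | zero => simp [pvOpt_zero]
    | succ k => simp only [pvOpt]; have := ih (k + 1) f; omega

theorem pvOpt_ub (s t : List (Int × Int)) (k : Nat) (f : Int → Int)
    (hsub : t.Sublist s) (hf : pvFeas k f t) : pvSum t ≤ pvOpt s k f := by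
  induction hsub generalizing k f with
  | slnil => simp [pvSum, pvOpt_nil]
  | @cons t s a hsub ih =>
    rcases a with ⟨v, l⟩
    cases k with
    | zero =>
      have : t = [] := by have := hf.1; simpa using this
      subst this; simp [pvSum, pvOpt_zero]
    | succ k =>
      have := ih (k + 1) f hf
      simp only [pvOpt]
      exact le_trans this (le_max_left _ _)
  | @cons₂ t s a hsub ih =>
    rcases a with ⟨v, l⟩
    cases k with
    | zero => exact absurd hf.1 (by simp)
    | succ k =>
      have hcnt := hf.2 l
      have hc1 : ((v, l) :: t).map Prod.snd = l :: t.map Prod.snd := rfl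
      rw [hc1] at hcnt
      rw [List.count_cons_self] at hcnt
      have hfl : 1 ≤ f l := by
        rcases hcnt with h | h
        · omega
        · have : (0 : Int) ≤ (t.map Prod.snd).count l := by positivity
          push_cast at h ⊢; omega
      have hfeas' : pvFeas k (pvDec f l) t := by
        constructor
        · have := hf.1; simpa using this
        · intro m
          have := hf.2 m
          rw [hc1, List.count_cons] at this
          by_cases hm : m = l
          · subst hm
            simp only [pvDec, if_pos rfl]
            rcases this with h | h
            · left; omega
            · right; push_cast at h ⊢; omega
          · simp only [pvDec, if_neg hm]
            have hne : (l == m) = false := by simp [Ne.symm hm]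
            rw [hne] at this; simpa using this
      have := ih k (pvDec f l) hfeas'
      simp only [pvOpt, if_pos hfl]
      have hsum : pvSum ((v, l) :: t) = v + pvSum t := by simp [pvSum]
      rw [hsum]
      exact le_trans (by omega) (le_max_right _ _)

theorem pvOpt_ach (s : List (Int × Int)) (k : Nat) (f : Int → Int) :
    ∃ t, t.Sublist s ∧ pvFeas k f t ∧ pvSum t = pvOpt s k f := by
  induction s generalizing k f with
  | nil =>
    exact ⟨[], List.Sublist.refl _, ⟨by simp, fun l => Or.inl (by simp)⟩, by simp [pvSum, pvOpt]⟩
  | cons a s ih =>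
    rcases a with ⟨v, l⟩
    cases k with
    | zero =>
      exact ⟨[], by simp, ⟨by simp, fun l => Or.inl (by simp)⟩, by simp [pvSum, pvOpt_zero]⟩
    | succ k =>
      by_cases hfl : 1 ≤ f l
      · by_cases hab : v + pvOpt s k (pvDec f l) ≤ pvOpt s (k + 1) f
        · obtain ⟨t, hsub, hfeas, hsum⟩ := ih (k + 1) f
          exact ⟨t, hsub.cons _, hfeas, by simp only [pvOpt, if_pos hfl]; omega⟩
        · obtain ⟨t, hsub, hfeas, hsum⟩ := ih k (pvDec f l)
          refine ⟨(v, l) :: t, hsub.cons₂ _, ⟨by simpa using hfeas.1, ?_⟩, ?_⟩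
          · intro m
            have := hfeas.2 m
            show ((l :: t.map Prod.snd).count m = 0 ∨ ((((l :: t.map Prod.snd).count m : Nat) : Int) ≤ f m))
            by_cases hm : m = l
            · subst hm
              right
              simp only [List.count_cons_self]
              rcases this with h | h
              · rw [h]; push_cast; omega
              · simp only [pvDec, if_pos rfl] at h; push_cast at h ⊢; omega
            · have hne : (l == m) = false := by simp [Ne.symm hm]
              simp only [List.count_cons, hne, if_false, Nat.add_zero, Bool.false_eq_true]
              simp only [pvDec, if_neg hm] at this
              exact this
          · simp only [pvOpt, if_pos hfl]
            have : pvSum ((v, l) :: t) = v + pvSum t := by simp [pvSum]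
            omega
      · obtain ⟨t, hsub, hfeas, hsum⟩ := ih (k + 1) f
        exact ⟨t, hsub.cons _, hfeas, by simp only [pvOpt, if_neg hfl]; omega⟩

theorem pvFeas_of_perm (k : Nat) (f : Int → Int) (t t' : List (Int × Int)) (hp : t'.Perm t)
    (hf : pvFeas k f t) : pvFeas k f t' := by
  refine ⟨hp.length_eq ▸ hf.1, fun l => ?_⟩
  have hc : (t'.map Prod.snd).count l = (t.map Prod.snd).count l := (hp.map Prod.snd).count_eq l
  rw [hc]; exact hf.2 l

theorem pvSum_of_perm (t t' : List (Int × Int)) (hp : t'.Perm t) : pvSum t' = pvSum t := by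
  unfold pvSum; exact (hp.map Prod.fst).sum_eq

theorem pvOpt_perm (s s' : List (Int × Int)) (k : Nat) (f : Int → Int) (h : s.Perm s') :
    pvOpt s k f = pvOpt s' k f := by
  have key : ∀ (u u' : List (Int × Int)), u.Perm u' → pvOpt u k f ≤ pvOpt u' k f := by
    intro u u' hp
    obtain ⟨t, hsub, hfeas, hsum⟩ := pvOpt_ach u k f
    have hsp : t.Subperm u' := (hsub.subperm).trans hp.subperm
    obtain ⟨t', hpt, hsub'⟩ := hsp
    rw [← hsum, ← pvSum_of_perm t t' hpt]
    exact pvOpt_ub u' t' k f hsub' (pvFeas_of_perm k f t t' hpt hfeas)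
  exact le_antisymm (key s s' h) (key s' s h.symm)

theorem pvOpt_nonpos (s : List (Int × Int)) (k : Nat) (f : Int → Int)
    (h : ∀ p ∈ s, p.1 ≤ 0) : pvOpt s k f = 0 := by
  induction s generalizing k f with
  | nil => rfl
  | cons a s ih =>
    rcases a with ⟨v, l⟩
    cases k with
    | zero => exact pvOpt_zero _ _
    | succ k =>
      have hv : v ≤ 0 := h (v, l) (by simp)
      have h' : ∀ p ∈ s, p.1 ≤ 0 := fun p hp => h p (by simp [hp])
      simp only [pvOpt, ih _ _ h']
      split <;> omega

-- a helper for weakening per-label feasibility after dropping elements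
theorem pvCount_drop (a b : Nat) (c : Int) (hab : a ≤ b) (h : b = 0 ∨ (b : Int) ≤ c) :
    a = 0 ∨ (a : Int) ≤ c := by omega

theorem pvOpt_exchange (s : List (Int × Int)) (k : Nat) (f : Int → Int) (v l : Int)
    (hmax : ∀ p ∈ s, p.1 ≤ v) (hv : 0 ≤ v) (hl : 1 ≤ f l) :
    pvOpt s (k + 1) f ≤ v + pvOpt s k (pvDec f l) := by
  obtain ⟨t, hsub, hfeas, hsum⟩ := pvOpt_ach s (k + 1) f
  rw [← hsum]
  by_cases h1 : 1 ≤ (t.map Prod.snd).count l ∧ ¬(((t.map Prod.snd).count l : Int) ≤ f l - 1)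
  · -- t uses label l up to its limit: drop one l-labelled element
    have hmem : l ∈ t.map Prod.snd := by
      rcases List.count_pos_iff.mp (by omega : 0 < (t.map Prod.snd).count l) with h
      exact h
    obtain ⟨x, hxt, hxl⟩ := List.mem_map.mp hmem
    obtain ⟨t₁, t₂, rfl⟩ := List.append_of_mem hxt
    have hsub' : (t₁ ++ t₂).Sublist s :=
      ((t₂.sublist_cons_self x).append_left t₁).trans hsub
    have hxv : x.1 ≤ v := hmax x (hsub.mem hxt)
    have hcnt : ∀ m, ((t₁ ++ t₂).map Prod.snd).count m + (if x.2 = m then 1 else 0)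
        = ((t₁ ++ x :: t₂).map Prod.snd).count m := by
      intro m
      simp only [List.map_append, List.map_cons, List.count_append, List.count_cons]
      have : (x.2 == m) = decide (x.2 = m) := by rfl
      split <;> rename_i hm <;> simp [hm] <;> omega
    have hfeas' : pvFeas k (pvDec f l) (t₁ ++ t₂) := by
      constructor
      · have := hfeas.1; simp only [List.length_append, List.length_cons] at this ⊢; omega
      · intro m
        have hd := hfeas.2 m
        have hc := hcnt m
        by_cases hm : m = l
        · rw [hm] at hd hc ⊢
          simp only [pvDec, if_pos rfl]
          rw [hxl, if_pos rfl] at hc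
          rcases hd with hz | hb
          · left; omega
          · right; push_cast at hb ⊢; omega
        · simp only [pvDec, if_neg hm]
          have : x.2 ≠ m := by rw [hxl]; exact Ne.symm hm
          rw [if_neg this] at hc
          rcases hd with hz | hb
          · left; omega
          · right; push_cast at hb ⊢; omega
    have hub := pvOpt_ub s (t₁ ++ t₂) k (pvDec f l) hsub' hfeas'
    have hsum2 : pvSum (t₁ ++ x :: t₂) = pvSum (t₁ ++ t₂) + x.1 := by
      simp only [pvSum, List.map_append, List.map_cons, List.sum_append, List.sum_cons]; ring
    omega
  · have hgood : (t.map Prod.snd).count l = 0 ∨ (((t.map Prod.snd).count l : Int)) ≤ f l - 1 := by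
      rcases hfeas.2 l with hz | hb
      · left; exact hz
      · by_cases hz : (t.map Prod.snd).count l = 0
        · left; exact hz
        · right; omega
    by_cases h2 : t.length ≤ k
    · have hfeas' : pvFeas k (pvDec f l) t := by
        refine ⟨h2, fun m => ?_⟩
        by_cases hm : m = l
        · subst hm; simp only [pvDec, if_pos rfl]; exact hgood
        · simp only [pvDec, if_neg hm]; exact hfeas.2 m
      have := pvOpt_ub s t k (pvDec f l) hsub hfeas'
      omega
    · -- t has full length k+1: drop its head
      rcases t with _ | ⟨x, t''⟩
      · simp at h2
      have hsub' : t''.Sublist s := (t''.sublist_cons_self x).trans hsub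
      have hxv : x.1 ≤ v := hmax x (hsub.mem (by simp))
      have hcnt : ∀ m, (t''.map Prod.snd).count m ≤ ((x :: t'').map Prod.snd).count m := by
        intro m; simp only [List.map_cons, List.count_cons]; omega
      have hfeas' : pvFeas k (pvDec f l) t'' := by
        constructor
        · have := hfeas.1; simp only [List.length_cons] at this; omega
        · intro m
          by_cases hm : m = l
          · rw [hm]; simp only [pvDec, if_pos rfl]
            exact pvCount_drop _ _ _ (hcnt l) hgood
          · simp only [pvDec, if_neg hm]
            exact pvCount_drop _ _ _ (hcnt m) (hfeas.2 m)
      have hub := pvOpt_ub s t'' k (pvDec f l) hsub' hfeas'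
      have hsum2 : pvSum (x :: t'') = x.1 + pvSum t'' := by simp [pvSum]
      omega


theorem pvGreedy_inv (use_limit : Int) (s : List (Int × Int)) (used : PySem.Dict Int Int)
    (remaining total : Int)
    (hs : s.Pairwise (fun a b => b.1 ≤ a.1)) :
    pvGreedyGo use_limit s used remaining total
      = total + pvOpt s remaining.toNat (fun l => use_limit - used.getD l 0) := by
  induction s generalizing used remaining total with
  | nil => simp [pvGreedyGo, pvOpt_nil]
  | cons a rest ih =>
    rcases a with ⟨v, l⟩
    have hhead : ∀ p ∈ rest, p.1 ≤ v := by
      intro p hp; exact (List.pairwise_cons.mp hs).1 p hp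
    have hrest : rest.Pairwise (fun a b => b.1 ≤ a.1) := (List.pairwise_cons.mp hs).2
    by_cases hstop : remaining ≤ 0 ∨ v ≤ 0
    · rw [pvGreedyGo, if_pos hstop]
      rcases hstop with hr | hv
      · have : remaining.toNat = 0 := by omega
        rw [this, pvOpt_zero]; ring
      · have : ∀ p ∈ (v, l) :: rest, p.1 ≤ 0 := by
          intro p hp
          rcases List.mem_cons.mp hp with rfl | hp'
          · exact hv
          · exact le_trans (hhead p hp') hv
        rw [pvOpt_nonpos _ _ _ this]; ring
    · rw [not_or] at hstop
      push Not at hstop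
      obtain ⟨hr, hv⟩ := hstop
      have hk : remaining.toNat = (remaining - 1).toNat + 1 := by omega
      rw [pvGreedyGo, if_neg (by push Not; exact ⟨hr, hv⟩)]
      by_cases htake : used.getD l 0 < use_limit
      · rw [if_pos htake]
        rw [ih _ _ _ hrest]
        have hfun : (fun m => use_limit - (used.insert l (used.getD l 0 + 1)).getD m 0)
            = pvDec (fun m => use_limit - used.getD m 0) l := by
          funext m
          simp only [pvDec, PySem.Dict.getD_insert]
          split <;> rename_i h
          · subst h; ring
          · ring
        rw [hfun, hk]
        have hexch := pvOpt_exchange rest (remaining - 1).toNat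
          (fun m => use_limit - used.getD m 0) v l hhead (le_of_lt hv)
          (by show (1:Int) ≤ use_limit - used.getD l 0; omega)
        have : pvOpt ((v, l) :: rest) ((remaining - 1).toNat + 1) (fun m => use_limit - used.getD m 0)
            = v + pvOpt rest (remaining - 1).toNat (pvDec (fun m => use_limit - used.getD m 0) l) := by
          simp only [pvOpt, if_pos (by omega : (1:Int) ≤ use_limit - used.getD l 0)]
          omega
        rw [this]; ring
      · rw [if_neg htake]
        rw [ih _ _ _ hrest, hk]
        have : pvOpt ((v, l) :: rest) ((remaining - 1).toNat + 1) (fun m => use_limit - used.getD m 0)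
            = pvOpt rest ((remaining - 1).toNat + 1) (fun m => use_limit - used.getD m 0) := by
          simp only [pvOpt, if_neg (by omega : ¬ (1:Int) ≤ use_limit - used.getD l 0)]
          omega
        rw [this, ← hk]

theorem alt_eq_opt (values labels : List Int) (num_wanted use_limit : Int) :
    largestValsFromLabels_alt values labels num_wanted use_limit
      = pvOpt (values.zip labels) num_wanted.toNat (fun _ => use_limit) := by
  unfold largestValsFromLabels_alt
  have hsorted : (PySem.List.sorted (values.zip labels) (fun p => -p.1) false).Pairwise
      (fun a b => b.1 ≤ a.1) := by
    have := PySem.List.sorted_pairwise (values.zip labels) (fun p : Int × Int => -p.1)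
    exact this.imp (by intro a b h; omega)
  rw [pvGreedy_inv _ _ _ _ _ hsorted]
  have hfun : (fun l => use_limit - PySem.Dict.empty.getD l 0) = (fun _ : Int => use_limit) := by
    funext m; rw [PySem.Dict.getD_empty]; ring
  rw [hfun, pvOpt_perm _ _ _ _ (PySem.List.sorted_perm (values.zip labels) _ false)]
  ring


theorem pvFoldGe {α : Type} (f : Int → α → Int) (h : ∀ m c, m ≤ f m c) :
    ∀ (L : List α) (m : Int), m ≤ L.foldl f m := by
  intro L
  induction L with
  | nil => intro m; simp
  | cons c L ih => intro m; exact le_trans (h m c) (ih (f m c))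

theorem pvFoldLeMax {α : Type} (f : Int → α → Int) (K : Int) :
    ∀ (L : List α) (m : Int), (∀ c ∈ L, ∀ m', f m' c ≤ max m' K) → L.foldl f m ≤ max m K := by
  intro L
  induction L with
  | nil => intro m _; simp
  | cons c L ih =>
    intro m h
    have h1 : f m c ≤ max m K := h c (by simp) m
    have h2 := ih (f m c) (fun c' hc' => h c' (by simp [hc']))
    calc L.foldl f (f m c) ≤ max (f m c) K := h2
      _ ≤ max (max m K) K := by omega
      _ = max m K := by omega

theorem pvFoldReach {α : Type} (f : Int → α → Int) (h : ∀ m c, m ≤ f m c) (x : Int) :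
    ∀ (L : List α) (m : Int) (c₀ : α), c₀ ∈ L → (∀ m', x ≤ f m' c₀) → x ≤ L.foldl f m := by
  intro L
  induction L with
  | nil => intro m c₀ hc; simp at hc
  | cons c L ih =>
    intro m c₀ hc hx
    rcases List.mem_cons.mp hc with rfl | hc'
    · exact le_trans (hx m) (pvFoldGe f h L (f m c₀))
    · exact ih (f m c) c₀ hc' hx

theorem pvCond_iff (L : List Int) (u : Int) :
    ((PySem.Dict.counter L).values.foldl (fun y c => if c ≤ u then y + 1 else y) (0 : Int)
        = ((PySem.Dict.counter L).keys.length : Int))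
      ↔ ∀ l, L.count l = 0 ∨ (L.count l : Int) ≤ u := by
  have hv : (PySem.Dict.counter L).values
      = (PySem.Set.ofList L).map (fun k => ((L.count k : Nat) : Int)) := by
    show (PySem.Dict.counter L).items.map Prod.snd = _
    rw [PySem.Dict.items_counter]
    simp [List.map_map, Function.comp_def]
  have hk : (PySem.Dict.counter L).keys.length = (PySem.Set.ofList L).length := by
    rw [PySem.Dict.keys_counter]
  have hfold : ∀ (vs : List Int) (a : Int),
      vs.foldl (fun y c => if c ≤ u then y + 1 else y) a
        = a + (vs.countP (fun c => decide (c ≤ u)) : Int) := by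
    intro vs a
    have : (fun (y c : Int) => if c ≤ u then y + 1 else y)
        = fun y c => if (fun c => decide (c ≤ u)) c = true then y + 1 else y := by
      funext y c; simp
    rw [this, PySem.List.foldl_count_if]
  rw [hv, hk, hfold]
  have hlen : ((PySem.Set.ofList L).map (fun k => ((L.count k : Nat) : Int))).length
      = (PySem.Set.ofList L).length := by simp
  constructor
  · intro h l
    have hcnt : ((PySem.Set.ofList L).map (fun k => ((L.count k : Nat) : Int))).countP
        (fun c => decide (c ≤ u))
        = ((PySem.Set.ofList L).map (fun k => ((L.count k : Nat) : Int))).length := by omega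
    have hall := List.countP_eq_length.mp hcnt
    by_cases hl : l ∈ L
    · right
      have : ((L.count l : Nat) : Int) ∈ (PySem.Set.ofList L).map (fun k => ((L.count k : Nat) : Int)) :=
        List.mem_map.mpr ⟨l, (PySem.Set.mem_ofList L l).mpr hl, rfl⟩
      have := hall _ this
      simpa using this
    · left; exact List.count_eq_zero.mpr hl
  · intro h
    have hall : ∀ a ∈ (PySem.Set.ofList L).map (fun k => ((L.count k : Nat) : Int)),
        (fun c => decide (c ≤ u)) a = true := by
      intro a ha
      obtain ⟨k, hk', rfl⟩ := List.mem_map.mp ha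
      have hkL : k ∈ L := (PySem.Set.mem_ofList L k).mp hk'
      rcases h k with hz | hb
      · exact absurd hz (by simpa [List.count_eq_zero] using hkL)
      · simpa using hb
    rw [List.countP_eq_length.mpr hall]
    omega


def pvStep (labels values : List Int) (u : Int) (maxi : Int) (subset : List Int) : Int :=
  let lv := subset.foldl (fun (acc : List Int × List Int) item =>
    (acc.1 ++ [PySem.List.pyGetD labels item 0], acc.2 ++ [PySem.List.pyGetD values item 0])) ([], [])
  let counts := PySem.Dict.counter lv.1
  let y := counts.values.foldl (fun y c => if c ≤ u then y + 1 else y) (0 : Int)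
  if y = (counts.keys.length : Int) then
    (if lv.2.sum > maxi then lv.2.sum else maxi)
  else maxi

theorem pvA_eq_foldl (values labels : List Int) (num_wanted use_limit : Int) :
    largestValsFromLabels values labels num_wanted use_limit
      = (PySem.List.pyRange 0 (num_wanted + 1) 1).foldl (fun maxi S =>
          (PySem.List.combinations (PySem.List.pyRange 0 (values.length : Int) 1) S.toNat).foldl
            (pvStep labels values use_limit) maxi) (-60000) := rfl

theorem pvLv (labels values : List Int) (c : List Int) :
    c.foldl (fun (acc : List Int × List Int) item =>
        (acc.1 ++ [PySem.List.pyGetD labels item 0], acc.2 ++ [PySem.List.pyGetD values item 0])) ([], [])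
      = (c.map (fun i => PySem.List.pyGetD labels i 0), c.map (fun i => PySem.List.pyGetD values i 0)) := by
  rw [PySem.List.foldl_prod_mk (fun a e => a ++ [PySem.List.pyGetD labels e 0])
    (fun b e => b ++ [PySem.List.pyGetD values e 0])]
  rw [PySem.List.foldl_append_singleton_eq_map, PySem.List.foldl_append_singleton_eq_map]
  simp

theorem pvStep_of_cond (labels values : List Int) (u m : Int) (c : List Int)
    (h : ∀ l, (c.map (fun i => PySem.List.pyGetD labels i 0)).count l = 0
        ∨ ((c.map (fun i => PySem.List.pyGetD labels i 0)).count l : Int) ≤ u) :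
    pvStep labels values u m c
      = (if (c.map (fun i => PySem.List.pyGetD values i 0)).sum > m
          then (c.map (fun i => PySem.List.pyGetD values i 0)).sum else m) := by
  unfold pvStep
  rw [pvLv]
  exact if_pos ((pvCond_iff _ u).mpr h)

theorem pvStep_of_not_cond (labels values : List Int) (u m : Int) (c : List Int)
    (h : ¬ ∀ l, (c.map (fun i => PySem.List.pyGetD labels i 0)).count l = 0
        ∨ ((c.map (fun i => PySem.List.pyGetD labels i 0)).count l : Int) ≤ u) :
    pvStep labels values u m c = m := by
  unfold pvStep
  rw [pvLv]
  exact if_neg (fun hy => h ((pvCond_iff _ u).mp hy))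

theorem pvStep_ge (labels values : List Int) (u m : Int) (c : List Int) :
    m ≤ pvStep labels values u m c := by
  by_cases h : ∀ l, (c.map (fun i => PySem.List.pyGetD labels i 0)).count l = 0
      ∨ ((c.map (fun i => PySem.List.pyGetD labels i 0)).count l : Int) ≤ u
  · rw [pvStep_of_cond _ _ _ _ _ h]; split <;> omega
  · rw [pvStep_of_not_cond _ _ _ _ _ h]

-- selecting the pair at each index of the index range is exactly zip values labels
theorem pvIdxMap (values labels : List Int) (hlen : values.length ≤ labels.length) :
    (PySem.List.pyRange 0 (values.length : Int) 1).map
        (fun i => (PySem.List.pyGetD values i 0, PySem.List.pyGetD labels i 0))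
      = values.zip labels := by
  apply List.ext_getElem
  · simp [PySem.List.length_pyRange_one]; omega
  · intro k h1 h2
    have hk : k < values.length := by
      simp [PySem.List.length_pyRange_one] at h1; omega
    have hk2 : k < labels.length := by omega
    simp only [List.getElem_map, PySem.List.getElem_pyRange_one, List.getElem_zip]
    rw [zero_add]
    rw [PySem.List.pyGetD_natCast, PySem.List.pyGetD_natCast]
    rw [List.getD_eq_getElem _ _ hk, List.getD_eq_getElem _ _ hk2]


theorem a_eq_opt (values labels : List Int) (num_wanted use_limit : Int)
    (hn : 0 ≤ num_wanted)
    (hlen : num_wanted = 0 ∨ values.length ≤ labels.length) :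
    largestValsFromLabels values labels num_wanted use_limit
      = pvOpt (values.zip labels) num_wanted.toNat (fun _ => use_limit) := by
  rcases hlen with hz | hlen
  · subst hz
    rw [pvA_eq_foldl]
    have h1 : PySem.List.pyRange 0 (0 + 1) 1 = [(0 : Int)] := by
      rw [zero_add]; exact PySem.List.pyRange_one_singleton 0
    rw [h1]
    simp only [List.foldl_cons, List.foldl_nil, Int.toNat_zero, PySem.List.combinations_zero]
    have hstep : pvStep labels values use_limit (-60000) [] = 0 := by
      rw [pvStep_of_cond _ _ _ _ _ (fun l => Or.inl (by simp))]
      norm_num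
    rw [hstep, pvOpt_zero]
  · rw [pvA_eq_foldl]
    set K := pvOpt (values.zip labels) num_wanted.toNat (fun _ => use_limit) with hK
    have hKnn : 0 ≤ K := pvOpt_nonneg _ _ _
    have hidx := pvIdxMap values labels hlen
    have hmono : ∀ (m : Int) (S : Int), m ≤
        (PySem.List.combinations (PySem.List.pyRange 0 (values.length : Int) 1) S.toNat).foldl
          (pvStep labels values use_limit) m :=
      fun m S => pvFoldGe _ (fun m' c => pvStep_ge labels values use_limit m' c) _ m
    apply le_antisymm
    · -- upper bound
      have hub : ∀ S ∈ PySem.List.pyRange 0 (num_wanted + 1) 1, ∀ m,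
          (PySem.List.combinations (PySem.List.pyRange 0 (values.length : Int) 1) S.toNat).foldl
            (pvStep labels values use_limit) m ≤ max m K := by
        intro S hS m
        apply pvFoldLeMax
        intro c hc m'
        obtain ⟨hcs, hclen⟩ := (PySem.List.mem_combinations_iff _ _ c).mp hc
        obtain ⟨hS0, hS1⟩ := PySem.List.mem_pyRange_one.mp hS
        have htmem : c.map (fun i => (PySem.List.pyGetD values i 0, PySem.List.pyGetD labels i 0))
            ∈ PySem.List.combinations (values.zip labels) S.toNat := by
          rw [← hidx, PySem.List.combinations_map]
          exact List.mem_map.mpr ⟨c, hc, rfl⟩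
        obtain ⟨hsub, htlen⟩ := (PySem.List.mem_combinations_iff _ _ _).mp htmem
        by_cases hcond : ∀ l, (c.map (fun i => PySem.List.pyGetD labels i 0)).count l = 0
            ∨ ((c.map (fun i => PySem.List.pyGetD labels i 0)).count l : Int) ≤ use_limit
        · rw [pvStep_of_cond _ _ _ _ _ hcond]
          have hfeas : pvFeas num_wanted.toNat (fun _ => use_limit)
              (c.map (fun i => (PySem.List.pyGetD values i 0, PySem.List.pyGetD labels i 0))) := by
            constructor
            · rw [htlen]; omega
            · intro l
              have hmm : (c.map (fun i => (PySem.List.pyGetD values i 0, PySem.List.pyGetD labels i 0))).map Prod.snd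
                  = c.map (fun i => PySem.List.pyGetD labels i 0) := by
                simp [List.map_map, Function.comp_def]
              rw [hmm]
              exact hcond l
          have hsum := pvOpt_ub _ _ _ _ hsub hfeas
          have hvv : pvSum (c.map (fun i => (PySem.List.pyGetD values i 0, PySem.List.pyGetD labels i 0)))
              = (c.map (fun i => PySem.List.pyGetD values i 0)).sum := by
            simp [pvSum, List.map_map, Function.comp_def]
          rw [hvv] at hsum
          rw [← hK] at hsum
          split <;> omega
        · rw [pvStep_of_not_cond _ _ _ _ _ hcond]
          omega
      calc (PySem.List.pyRange 0 (num_wanted + 1) 1).foldl _ (-60000)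
          ≤ max (-60000) K := pvFoldLeMax _ K _ _ hub
        _ = K := by omega
    · -- lower bound via the optimal feasible selection
      obtain ⟨t₀, hsub₀, hfeas₀, hsum₀⟩ := pvOpt_ach (values.zip labels) num_wanted.toNat (fun _ => use_limit)
      have ht₀ : t₀ ∈ PySem.List.combinations (values.zip labels) t₀.length :=
        (PySem.List.mem_combinations_iff _ _ _).mpr ⟨hsub₀, rfl⟩
      rw [← hidx, PySem.List.combinations_map] at ht₀
      obtain ⟨c₀, hc₀, hc₀t⟩ := List.mem_map.mp ht₀
      have hS₀mem : ((t₀.length : Int)) ∈ PySem.List.pyRange 0 (num_wanted + 1) 1 := by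
        rw [PySem.List.mem_pyRange_one]
        have := hfeas₀.1
        omega
      have htoNat : ((t₀.length : Int)).toNat = t₀.length := Int.toNat_natCast _
      have hcond : ∀ l, (c₀.map (fun i => PySem.List.pyGetD labels i 0)).count l = 0
          ∨ ((c₀.map (fun i => PySem.List.pyGetD labels i 0)).count l : Int) ≤ use_limit := by
        intro l
        have hmm : (c₀.map (fun i => PySem.List.pyGetD labels i 0)) = t₀.map Prod.snd := by
          rw [← hc₀t]; simp [List.map_map, Function.comp_def]
        rw [hmm]
        exact hfeas₀.2 l
      have hstep₀ : ∀ m', K ≤ pvStep labels values use_limit m' c₀ := by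
        intro m'
        rw [pvStep_of_cond _ _ _ _ _ hcond]
        have hvv : (c₀.map (fun i => PySem.List.pyGetD values i 0)).sum = pvSum t₀ := by
          rw [← hc₀t]; simp [pvSum, List.map_map, Function.comp_def]
        rw [hvv, hsum₀, ← hK]
        split <;> omega
      apply pvFoldReach _ hmono K _ _ ((t₀.length : Int)) hS₀mem
      intro m'
      apply pvFoldReach _ (fun m c => pvStep_ge labels values use_limit m c) K _ _ c₀ _ hstep₀
      rw [htoNat]
      exact hc₀

-- ===== VERDICT (by name: the statement is the Claim_ definition above) =====
theorem largestValsFromLabels_spec : Claim_equal_largestValsFromLabels := by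
  intro values labels num_wanted use_limit _ hpre
  obtain ⟨hn, hlen⟩ := hpre
  show largestValsFromLabels values labels num_wanted use_limit
    = largestValsFromLabels_alt values labels num_wanted use_limit
  rw [a_eq_opt _ _ _ _ hn hlen, alt_eq_opt]
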